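-- pv_equiv track=rewrite | github.com/rOrtiz28/UPRM-Stuff | CIIC3011-Projects/OrtizRaul_096_P2.py | count_nucl_freq
-- ===== SOURCE A (Python) =====
-- def count_nucl_freq(dataList):
--     """Count the occurrences of characters by column."""
--     countStruct = list()  # Indexed by columns (List of what?) Dictionaries
--     for Count_Sequences in range(0, len(dataList[0])): #For loop to see the number of characters in the sequence
--         ListDic = {'A':0, 'G':0, 'T':0, 'C':0} #Empty dictionary that will store all the values of the sequences
--         for row in range(0, len(dataList)): #For loop that will look the rows.
--
--             Nucleotide = dataList[row][Count_Sequences] #Add the values to the dictionary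
--             #This will add all the 'A' of the sequences to the dictionary
--             if Nucleotide == 'A':
--                 ListDic['A'] = ListDic['A'] + 1
--             #This will add all the 'C' of the sequences to the dictionary
--             elif Nucleotide == 'C':
--                 ListDic['C'] = ListDic['C'] + 1
--             #This will add all the 'G' of the sequences to the dictionary
--             elif Nucleotide == 'G':
--                 ListDic['G'] = ListDic['G'] + 1
--             #This will add all the 'T' of the sequences to the dictionary
--             elif Nucleotide == 'T':
--                 ListDic['T'] = ListDic['T'] + 1
--         countStruct.append(ListDic)
--
--     return countStruct
-- ===== SOURCE B (Python) =====
-- def count_nucl_freq(dataList):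
--     """Count the occurrences of characters by column."""
--     return [{'A': col.count('A'), 'G': col.count('G'),
--              'T': col.count('T'), 'C': col.count('C')}
--             for col in zip(*dataList)]
-- ===== Notes on version B (the rewrite author's own statement) =====
-- stated objective: idiomatic
-- what changed: Replaces the index-driven double loop with dict mutation by a transpose (zip(*dataList)) followed by four tuple.count calls per column.
import Mathlib
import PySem

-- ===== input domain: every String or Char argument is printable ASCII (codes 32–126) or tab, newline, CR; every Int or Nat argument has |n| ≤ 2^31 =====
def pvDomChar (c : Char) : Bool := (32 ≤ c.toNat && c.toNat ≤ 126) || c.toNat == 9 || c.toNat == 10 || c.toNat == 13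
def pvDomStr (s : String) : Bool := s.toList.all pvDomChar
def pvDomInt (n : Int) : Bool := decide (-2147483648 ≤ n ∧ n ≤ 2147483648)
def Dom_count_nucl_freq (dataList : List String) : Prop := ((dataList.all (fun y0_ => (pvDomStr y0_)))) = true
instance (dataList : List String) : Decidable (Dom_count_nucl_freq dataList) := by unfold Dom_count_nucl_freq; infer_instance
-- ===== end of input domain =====

-- B replaces A's index-driven double loop with dict mutation by a transpose (zip(*dataList)) plus four per-column count calls; same asymptotic cost, more idiomatic.


-- ===== PORT A =====
-- one row step of A's inner loop: the if/elif chain updating the dictionary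
def pvStepA (d : PySem.Dict String Int) (nuc : Char) : PySem.Dict String Int :=
  if nuc = 'A' then d.insert "A" (d.getD "A" 0 + 1)
  else if nuc = 'C' then d.insert "C" (d.getD "C" 0 + 1)
  else if nuc = 'G' then d.insert "G" (d.getD "G" 0 + 1)
  else if nuc = 'T' then d.insert "T" (d.getD "T" 0 + 1)
  else d

def count_nucl_freq (dataList : List String) : List (List (String × Int)) :=
  (PySem.List.pyRange 0 (PySem.Str.len ((PySem.List.pyGet? dataList 0).getD "")) 1).foldl
    (fun countStruct cs =>
      countStruct ++
        [((PySem.List.pyRange 0 (dataList.length : Int) 1).foldl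
            (fun d row =>
              pvStepA d ((PySem.Str.pyGet? ((PySem.List.pyGet? dataList row).getD "") cs).getD ' '))
            ⟨[("A", 0), ("G", 0), ("T", 0), ("C", 0)]⟩).items])
    []

-- ===== PORT B =====
-- zip(*dataList): columns up to the shortest row (hand-ported, exact: n-ary zip truncates at the minimum length)
def pvZipStar (dataList : List String) : List (List Char) :=
  match dataList.map (fun s => s.toList.length) with
  | [] => []
  | l :: ls =>
      (List.range (ls.foldl min l)).map (fun i => dataList.map (fun s => s.toList.getD i ' '))

def count_nucl_freq_alt (dataList : List String) : List (List (String × Int)) :=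
  (pvZipStar dataList).map (fun col =>
    [("A", (PySem.List.count col 'A' : Int)), ("G", (PySem.List.count col 'G' : Int)),
     ("T", (PySem.List.count col 'T' : Int)), ("C", (PySem.List.count col 'C' : Int))])

-- ===== PRECONDITION & SPEC =====
-- Pre_ excludes exactly the inputs where A raises IndexError: the empty list (dataList[0])
-- and lists with a row shorter than the first row (dataList[row][col] out of range).
def Pre_count_nucl_freq (dataList : List String) : Prop :=
  dataList ≠ [] ∧ ∀ s ∈ dataList, dataList.headI.toList.length ≤ s.toList.length
instance (dataList : List String) : Decidable (Pre_count_nucl_freq dataList) := by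
  unfold Pre_count_nucl_freq; infer_instance

def pvWitness_count_nucl_freq : List String := ["AG", "CT"]

def Spec_count_nucl_freq (dataList : List String) (out : List (List (String × Int))) : Prop := out = count_nucl_freq_alt dataList
instance (dataList : List String) (out : List (List (String × Int))) : Decidable (Spec_count_nucl_freq dataList out) := by unfold Spec_count_nucl_freq; infer_instance

-- ===== CLAIM (what is proved, stated in full; the proofs are below) =====
def Claim_equal_count_nucl_freq : Prop := ∀ (dataList : List String), Dom_count_nucl_freq dataList → Pre_count_nucl_freq dataList → Spec_count_nucl_freq dataList (count_nucl_freq dataList)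

-- ===== LEMMAS AND PROOFS =====
-- (verdict theorems at the bottom)

lemma pv_foldl_min_eq (ls : List Nat) (l : Nat) (h : ∀ x ∈ ls, l ≤ x) : ls.foldl min l = l := by
  induction ls with
  | nil => rfl
  | cons x t ih =>
      simp only [List.foldl_cons]
      rw [min_eq_left (h x (by simp))]
      exact ih (fun y hy => h y (by simp [hy]))

-- one step of A's inner loop on the four-key dictionary, evaluated
lemma pvStepA_eval (a g t c : Int) (x : Char) :
    pvStepA ⟨[("A", a), ("G", g), ("T", t), ("C", c)]⟩ x =
      ⟨[("A", a + if x = 'A' then 1 else 0), ("G", g + if x = 'G' then 1 else 0),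
        ("T", t + if x = 'T' then 1 else 0), ("C", c + if x = 'C' then 1 else 0)]⟩ := by
  unfold pvStepA
  split_ifs <;> simp_all [PySem.Dict.insert, PySem.Dict.getD, PySem.Dict.get?]

-- A's inner loop over one column of characters, from the running dictionary
lemma pv_inner_inv (cs : List Char) (a g t c : Int) :
    cs.foldl pvStepA ⟨[("A", a), ("G", g), ("T", t), ("C", c)]⟩ =
      ⟨[("A", a + cs.count 'A'), ("G", g + cs.count 'G'),
        ("T", t + cs.count 'T'), ("C", c + cs.count 'C')]⟩ := by
  induction cs generalizing a g t c with
  | nil => simp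
  | cons x rest ih =>
      rw [List.foldl_cons, pvStepA_eval, ih]
      simp only [PySem.Dict.mk.injEq, List.cons.injEq, Prod.mk.injEq, List.count_cons,
        beq_iff_eq, true_and, and_true]
      refine ⟨?_, ?_, ?_, ?_⟩ <;> split_ifs <;> simp_all <;> omega

theorem count_nucl_freq_spec : Claim_equal_count_nucl_freq := by
  intro dl _ hpre
  obtain ⟨hne, hall⟩ := hpre
  obtain ⟨h0, t, rfl⟩ : ∃ h0 t, dl = h0 :: t := by
    cases dl with
    | nil => exact absurd rfl hne
    | cons a b => exact ⟨a, b, rfl⟩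
  simp only [List.headI_cons] at hall
  unfold Spec_count_nucl_freq count_nucl_freq count_nucl_freq_alt pvZipStar
  simp only [List.map_cons]
  rw [pv_foldl_min_eq _ _ (by
    intro x hx
    simp only [List.mem_map] at hx
    obtain ⟨s, hs, rfl⟩ := hx
    exact hall s (by simp [hs]))]
  rw [show (PySem.List.pyGet? (h0 :: t) 0).getD "" = h0 by simp [pysem],
    PySem.Str.len_eq, PySem.List.foldl_append_singleton_eq_map, PySem.List.pyRange_zero_nat h0.toList.length,
    List.map_map, List.nil_append, List.map_map]
  apply List.map_congr_left
  intro i hi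
  simp only [List.mem_range] at hi
  simp only [Function.comp_apply]
  rw [show (fun (d : PySem.Dict String Int) (row : Int) =>
        pvStepA d ((PySem.Str.pyGet? ((PySem.List.pyGet? (h0 :: t) row).getD "") (i : Int)).getD ' ')) =
      (fun d row =>
        (fun (d : PySem.Dict String Int) (s : String) =>
          pvStepA d ((PySem.Str.pyGet? s (i : Int)).getD ' ')) d
          (PySem.List.pyGetD (h0 :: t) row "")) from rfl]
  rw [PySem.List.foldl_pyRange_zero_pyGetD' (h0 :: t) ""
    (fun (d : PySem.Dict String Int) (s : String) =>
      pvStepA d ((PySem.Str.pyGet? s (i : Int)).getD ' '))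
    ⟨[("A", 0), ("G", 0), ("T", 0), ("C", 0)]⟩]
  rw [← List.foldl_map (f := fun s => (PySem.Str.pyGet? s (i : Int)).getD ' ') (g := pvStepA)]
  rw [show (h0 :: t).map (fun s => (PySem.Str.pyGet? s (i : Int)).getD ' ') =
      (h0 :: t).map (fun s => s.toList.getD i ' ') from
    List.map_congr_left (by
      intro s hs
      have hlen : i < s.toList.length := lt_of_lt_of_le hi (hall s hs)
      simp [pysem])]
  rw [pv_inner_inv]
  simp [PySem.List.count_eq]
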